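-- pv_equiv track=rewrite | github.com/JohnStarich/github-code-recommendations | data-scripts/word-diff.py | getConditionalCounts
-- ===== SOURCE A (Python) =====
-- def getNGrams(text, n):
--     text = (" " * (n - 1)) + text + " "
--     return [text[i:i+n] for i in range(len(text) - n + 1)]
--
-- def getConditionalCounts(sentences, n):
--     condCounts = {}
--     for sentence in sentences:
--         ngrams = getNGrams(sentence, n)
--         for gram in ngrams:
--             context, lastChar = gram[:n - 1], gram[-1]
--             condCounts.setdefault(context, {}).setdefault(lastChar, 0)
--             condCounts[context][lastChar] += 1
--     return condCounts
-- ===== SOURCE B (Python) =====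
-- def getConditionalCounts(sentences, n):
--     # Stage 1: materialize the full stream of (context, lastChar) pairs.
--     pairs = []
--     for sentence in sentences:
--         text = (" " * (n - 1)) + sentence + " "
--         pairs += [(text[i:i + n - 1], text[i + n - 1]) for i in range(len(text) - n + 1)]
--     # Stage 2: group-by on the pair list — no counting dict at all; for each
--     # first-occurrence-ordered distinct context, filter its chars and count with list.count.
--     result = {}
--     for context in dict.fromkeys(c for c, _ in pairs):
--         chars = [ch for c, ch in pairs if c == context]
--         result[context] = {ch: chars.count(ch) for ch in dict.fromkeys(chars)}
--     return result
-- ===== Notes on version B (the rewrite author's own statement) =====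
-- stated objective: alternative
-- what changed: A counts incrementally into a nested dict (setdefault-of-setdefault, +=1 per n-gram) in one pass; B never maintains a counting dict: it materializes the whole (context, lastChar) pair stream, then group-bys it — for each first-occurrence-ordered distinct context it filters that context's chars and computes each count with list.count over the filtered list.
-- outside the precondition, e.g. on getConditionalCounts(['ab'], 0): A raises IndexError, B returns {'ab': {' ': 1}, '': {'a': 1, 'b': 1, ' ': 1}}
import Mathlib
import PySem

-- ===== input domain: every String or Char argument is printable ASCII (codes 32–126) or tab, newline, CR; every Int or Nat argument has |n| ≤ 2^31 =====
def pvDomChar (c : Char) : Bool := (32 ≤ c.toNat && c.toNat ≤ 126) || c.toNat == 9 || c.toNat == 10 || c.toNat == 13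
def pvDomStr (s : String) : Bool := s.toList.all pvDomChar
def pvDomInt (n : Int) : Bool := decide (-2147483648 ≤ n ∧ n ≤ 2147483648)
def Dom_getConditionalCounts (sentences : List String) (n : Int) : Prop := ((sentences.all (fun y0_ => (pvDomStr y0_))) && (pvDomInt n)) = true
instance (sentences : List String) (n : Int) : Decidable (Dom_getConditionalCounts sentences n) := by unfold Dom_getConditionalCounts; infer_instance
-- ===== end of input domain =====

-- B replaces A's one-pass incremental nested-dict counting by a staged group-by: materialize the
-- (context, lastChar) pair stream, then per distinct context filter its chars and count with
-- list.count (objective: alternative decomposition, no counting dict; not faster).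

-- ===== PORT A =====
def pyAGetNGrams (text : List Char) (n : Int) : List (List Char) :=
  -- text = (" " * (n - 1)) + text + " "
  let t := List.replicate (n - 1).toNat ' ' ++ text ++ [' ']
  -- [text[i:i+n] for i in range(len(text) - n + 1)]
  (PySem.List.pyRange 0 ((t.length : Int) - n + 1) 1).map
    (fun i => PySem.List.slice t (some i) (some (i + n)))

def getConditionalCounts (sentences : List String) (n : Int) : List (String × List (String × Int)) :=
  let condCounts : PySem.Dict String (PySem.Dict String Int) :=
    sentences.foldl (fun condCounts sentence =>
      let ngrams := pyAGetNGrams sentence.toList n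
      ngrams.foldl (fun condCounts gram =>
        let context := String.ofList (PySem.List.slice gram none (some (n - 1)))
        -- gram[-1]; on empty gram Python raises IndexError (excluded by Pre_); '""' stands for the raise
        let lastChar := String.ofList (((PySem.List.pyGet? gram (-1)).map (fun c => [c])).getD [])
        -- condCounts.setdefault(context, {}).setdefault(lastChar, 0); condCounts[context][lastChar] += 1
        let condCounts := condCounts.setdefault context PySem.Dict.empty
        let inner := (condCounts.getD context PySem.Dict.empty).setdefault lastChar 0
        condCounts.insert context (inner.insert lastChar (inner.getD lastChar 0 + 1))
      ) condCounts
    ) PySem.Dict.empty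
  condCounts.items.map (fun p => (p.1, p.2.items))

-- ===== PORT B =====
def pyBPairs (text : List Char) (n : Int) : List (String × String) :=
  -- text = (" " * (n - 1)) + text + " "; [(text[i:i+n-1], text[i+n-1]) for i in range(len(text) - n + 1)]
  let t := List.replicate (n - 1).toNat ' ' ++ text ++ [' ']
  (PySem.List.pyRange 0 ((t.length : Int) - n + 1) 1).map
    (fun i => (String.ofList (PySem.List.slice t (some i) (some (i + n - 1))),
               -- text[i+n-1]; on a raising index (possible only outside Pre_) '""' stands for the raise
               String.ofList (((PySem.List.pyGet? t (i + n - 1)).map (fun c => [c])).getD [])))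

def getConditionalCounts_alt (sentences : List String) (n : Int) : List (String × List (String × Int)) :=
  -- Stage 1: materialize the full (context, lastChar) pair stream (pairs += [...])
  let pairs : List (String × String) :=
    sentences.foldl (fun pairs sentence => pairs ++ pyBPairs sentence.toList n) []
  -- Stage 2: group-by — for context in dict.fromkeys(c for c, _ in pairs):
  --   chars = [ch for c, ch in pairs if c == context]; result[context] = {ch: chars.count(ch) for ch in dict.fromkeys(chars)}
  let result : PySem.Dict String (PySem.Dict String Int) :=
    (PySem.Set.ofList (pairs.map (fun p => p.1))).foldl (fun result context =>
      let chars := (pairs.filter (fun p => p.1 == context)).map (fun p => p.2)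
      result.insert context
        ((PySem.Set.ofList chars).foldl
          (fun d ch => d.insert ch ((chars.count ch : Nat) : Int)) PySem.Dict.empty)
    ) PySem.Dict.empty
  result.items.map (fun p => (p.1, p.2.items))

-- ===== PRECONDITION & SPEC =====
-- Pre_ excludes n ≤ 0 with a nonempty sentence list: there every gram is the empty string and
-- A raises IndexError at gram[-1] (it returns no value there).
def Pre_getConditionalCounts (sentences : List String) (n : Int) : Prop :=
  1 ≤ n ∨ sentences = []
instance (sentences : List String) (n : Int) : Decidable (Pre_getConditionalCounts sentences n) := by
  unfold Pre_getConditionalCounts; infer_instance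

def pvWitness_getConditionalCounts : List String × Int := (["ab a"], 2)

def Spec_getConditionalCounts (sentences : List String) (n : Int) (out : List (String × List (String × Int))) : Prop := out = getConditionalCounts_alt sentences n
instance (sentences : List String) (n : Int) (out : List (String × List (String × Int))) : Decidable (Spec_getConditionalCounts sentences n out) := by unfold Spec_getConditionalCounts; infer_instance

-- ===== CLAIM (what is proved, stated in full; the proofs are below) =====
def Claim_equal_getConditionalCounts : Prop := ∀ (sentences : List String) (n : Int), Dom_getConditionalCounts sentences n → Pre_getConditionalCounts sentences n → Spec_getConditionalCounts sentences n (getConditionalCounts sentences n)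

-- ===== LEMMAS AND PROOFS =====

-- the canonical loop step A's body reduces to
def pvNStep (d : PySem.Dict String (PySem.Dict String Int)) (p : String × String) :
    PySem.Dict String (PySem.Dict String Int) :=
  d.modify p.1 PySem.Dict.empty (fun inner => inner.modify p.2 0 (· + 1))

def pvExtract (n : Int) (gram : List Char) : String × String :=
  (String.ofList (PySem.List.slice gram none (some (n - 1))),
   String.ofList (((PySem.List.pyGet? gram (-1)).map (fun c => [c])).getD []))

theorem pvModify_eq {κ ν : Type} [BEq κ] (d : PySem.Dict κ ν) (k : κ) (d0 : ν) (f : ν → ν) :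
    d.modify k d0 f = d.insert k (f (d.getD k d0)) := rfl

-- A's setdefault/setdefault/+= body is one nested modify
theorem pvAStep_eq (d : PySem.Dict String (PySem.Dict String Int)) (c ch : String) :
    (let d1 := d.setdefault c PySem.Dict.empty
     let inner := (d1.getD c PySem.Dict.empty).setdefault ch 0
     d1.insert c (inner.insert ch (inner.getD ch 0 + 1)))
    = pvNStep d (c, ch) := by
  simp only [pvNStep, pvModify_eq]
  by_cases hc : d.contains c
  · rw [PySem.Dict.setdefault_of_contains _ _ hc]
    by_cases hch : (d.getD c PySem.Dict.empty).contains ch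
    · rw [PySem.Dict.setdefault_of_contains _ _ hch]
    · rw [PySem.Dict.setdefault_of_not_contains _ _ (by simpa using hch),
        PySem.Dict.getD_insert_self, PySem.Dict.insert_insert_self,
        PySem.Dict.getD_of_not_contains (d.getD c PySem.Dict.empty) 0 (by simpa using hch)]
  · rw [PySem.Dict.setdefault_of_not_contains _ _ (by simpa using hc), PySem.Dict.getD_insert_self,
      PySem.Dict.setdefault_of_not_contains _ _ (PySem.Dict.contains_empty ch),
      PySem.Dict.getD_insert_self,
      PySem.Dict.getD_of_not_contains d PySem.Dict.empty (by simpa using hc),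
      PySem.Dict.getD_empty, PySem.Dict.insert_insert_self]
    rw [PySem.Dict.insert_insert_self]

-- extracting (context, lastChar) from A's gram i gives B's pair i
theorem pvExtract_slice (t : List Char) (n i : Int) (hn : 1 ≤ n) (h0 : 0 ≤ i)
    (hi : i + n ≤ (t.length : Int)) :
    pvExtract n (PySem.List.slice t (some i) (some (i + n)))
      = (String.ofList (PySem.List.slice t (some i) (some (i + n - 1))),
         String.ofList (((PySem.List.pyGet? t (i + n - 1)).map (fun c => [c])).getD [])) := by
  obtain ⟨j, rfl⟩ : ∃ j : Nat, i = (j : Int) := ⟨i.toNat, (Int.toNat_of_nonneg h0).symm⟩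
  obtain ⟨m, rfl⟩ : ∃ m : Nat, n = (m : Int) := ⟨n.toNat, (Int.toNat_of_nonneg (by omega)).symm⟩
  have hm : 1 ≤ m := by exact_mod_cast hn
  have hjm : j + m ≤ t.length := by exact_mod_cast hi
  have hg : PySem.List.slice t (some (j : Int)) (some ((j : Int) + (m : Int)))
      = (t.drop j).take m := by
    rw [PySem.List.slice_natCast_add]
  have hg1 : PySem.List.slice t (some (j : Int)) (some ((j : Int) + (m : Int) - 1))
      = (t.drop j).take (m - 1) := by
    rw [show (j : Int) + (m : Int) - 1 = ((j + (m-1) : Nat) : Int) by omega,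
      PySem.List.slice_natCast]
    congr 1; omega
  have hlen : ((t.drop j).take m).length = m := by
    simp [List.length_take, List.length_drop]; omega
  unfold pvExtract
  rw [hg, hg1]
  refine Prod.ext_iff.mpr ⟨?_, ?_⟩
  · -- context component
    rw [PySem.List.slice_to _ (by omega : (0:Int) ≤ (m:Int) - 1),
      show ((m:Int) - 1).toNat = m - 1 by omega, List.take_take,
      show min (m - 1) m = m - 1 by omega]
  · -- last char component
    rw [PySem.List.pyGet?_neg_one, List.getLast?_eq_getElem?, hlen,
      show (j:Int) + (m:Int) - 1 = ((j + m - 1 : Nat) : Int) by omega,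
      PySem.List.pyGet?_natCast]
    rw [List.getElem?_take_of_lt (by omega), List.getElem?_drop,
      show j + (m - 1) = j + m - 1 by omega]

theorem pvGrams_map (text : List Char) (n : Int) (hn : 1 ≤ n) :
    (pyAGetNGrams text n).map (pvExtract n) = pyBPairs text n := by
  unfold pyAGetNGrams pyBPairs
  rw [List.map_map]
  apply List.map_congr_left
  intro i hi
  obtain ⟨h0, hlt⟩ := PySem.List.mem_pyRange_one.mp hi
  have hle : i + n ≤ ((List.replicate (n - 1).toNat ' ' ++ text ++ [' ']).length : Int) := by
    omega
  simpa [Function.comp] using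
    pvExtract_slice (List.replicate (n - 1).toNat ' ' ++ text ++ [' ']) n i hn h0 hle

-- the inner dict of A's nested fold at context c is the counter of c's chars
theorem pvGetD_nested (l : List (String × String)) (d : PySem.Dict String (PySem.Dict String Int))
    (c : String) :
    (l.foldl pvNStep d).getD c PySem.Dict.empty
      = ((l.filter (fun p => p.1 == c)).map (·.2)).foldl
          (fun inner ch => inner.modify ch 0 (· + 1)) (d.getD c PySem.Dict.empty) := by
  induction l generalizing d with
  | nil => rfl
  | cons p l ih =>
    rw [List.foldl_cons, ih, List.filter_cons]
    by_cases hp : p.1 = c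
    · simp only [hp, beq_self_eq_true, if_true, List.map_cons, List.foldl_cons]
      congr 1
      simp only [pvNStep, hp]
      exact PySem.Dict.getD_modify_self d c PySem.Dict.empty _
    · simp only [show (p.1 == c) = false from beq_eq_false_iff_ne.mpr hp]
      congr 1
      simp only [pvNStep]
      exact PySem.Dict.getD_modify_of_ne d PySem.Dict.empty _ (Ne.symm hp)


-- a fold of fresh inserts over a Nodup key set lists its items in key order
theorem pvItems_fresh {ν : Type} (l : PySem.Set String) (v : String → ν) (hnd : l.Nodup) :
    (l.foldl (fun d c => d.insert c (v c)) PySem.Dict.empty).items = l.map (fun c => (c, v c)) := by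
  have h := PySem.Dict.items_foldl_insert_fresh (l := l) (k := fun c => c) (v := v)
    (d := PySem.Dict.empty) (fun a _ => PySem.Dict.contains_empty _)
    (by rw [show (fun c : String => c) = id from rfl, List.map_id]; exact hnd)
  simpa using h

-- ===== VERDICT (by name: the statement is the Claim_ definition above) =====
set_option maxHeartbeats 1600000 in
theorem getConditionalCounts_spec : Claim_equal_getConditionalCounts := by
  intro sentences n _ hpre
  unfold Spec_getConditionalCounts getConditionalCounts getConditionalCounts_alt
  rcases hpre with hn | hnil
  · -- the common pair stream
    set P : List (String × String) := sentences.flatMap (fun s => pyBPairs s.toList n) with hP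
    -- A's nested fold over sentences is one fold of pvNStep over P
    have h1 : sentences.foldl (fun condCounts sentence =>
        let ngrams := pyAGetNGrams sentence.toList n
        ngrams.foldl (fun condCounts gram =>
          let context := String.ofList (PySem.List.slice gram none (some (n - 1)))
          let lastChar := String.ofList
            (((PySem.List.pyGet? gram (-1)).map (fun c => [c])).getD [])
          let condCounts := condCounts.setdefault context PySem.Dict.empty
          let inner := (condCounts.getD context PySem.Dict.empty).setdefault lastChar 0
          condCounts.insert context (inner.insert lastChar (inner.getD lastChar 0 + 1))
        ) condCounts) PySem.Dict.empty
      = P.foldl pvNStep PySem.Dict.empty := by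
      rw [hP, List.foldl_flatMap]
      apply PySem.List.foldl_congr_mem
      intro acc s _
      rw [← pvGrams_map s.toList n hn, List.foldl_map]
      apply PySem.List.foldl_congr_mem
      intro acc2 gram _
      exact pvAStep_eq acc2 _ _
    -- B's accumulated pair list is P
    have h2 : sentences.foldl (fun pairs sentence => pairs ++ pyBPairs sentence.toList n) []
        = P := by
      rw [hP, PySem.List.foldl_append_eq_flatMap]
      rfl
    rw [h1, h2]
    set D := P.foldl pvNStep PySem.Dict.empty with hD
    set L := PySem.Set.ofList (P.map (fun p => p.1)) with hL
    have hndL : L.Nodup := by rw [hL]; exact PySem.Set.nodup_ofList _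
    -- characterize A's dict: Nodup keys, keys = L
    have hndD : D.keys.Nodup :=
      PySem.Dict.nodup_keys_foldl_modify_key P Prod.fst PySem.Dict.empty
        (fun _ p inner => inner.modify p.2 0 (· + 1)) PySem.Dict.empty
        (by rw [PySem.Dict.keys_empty]; exact List.nodup_nil)
    have hkD0 : D.keys = PySem.Set.update PySem.Dict.empty.keys (P.map Prod.fst) :=
      PySem.Dict.keys_foldl_modify_key P Prod.fst PySem.Dict.empty
        (fun _ p inner => inner.modify p.2 0 (· + 1)) PySem.Dict.empty
    have hkD : D.keys = L := by
      rw [hkD0, PySem.Dict.keys_empty, hL, PySem.Set.ofList_eq_foldl]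
      rfl
    have hDitems : D.items = L.map (fun c => (c, D.getD c PySem.Dict.empty)) := by
      rw [PySem.Dict.items_eq_map_keys D hndD PySem.Dict.empty, hkD]
    -- reduce to the two dicts being equal, with B's let-bindings zeta-expanded
    refine congrArg (fun d : PySem.Dict String (PySem.Dict String Int) =>
      d.items.map (fun p => (p.1, p.2.items))) ?_
    show D = L.foldl (fun result context =>
        result.insert context
          ((PySem.Set.ofList ((P.filter (fun p => p.1 == context)).map (fun p => p.2))).foldl
            (fun d ch =>
              d.insert ch
                ((((P.filter (fun p => p.1 == context)).map (fun p => p.2)).count ch : Nat) : Int))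
            PySem.Dict.empty))
      PySem.Dict.empty
    apply PySem.Dict.ext
    rw [hDitems, pvItems_fresh L _ hndL]
    apply List.map_congr_left
    intro c _
    congr 1
    -- the inner dicts agree: A's is the counter of c's chars, B's lists the same counts
    have hinner : D.getD c PySem.Dict.empty
        = PySem.Dict.counter ((P.filter (fun p => p.1 == c)).map (fun p => p.2)) := by
      rw [hD, pvGetD_nested, PySem.Dict.getD_empty]
      rfl
    apply PySem.Dict.ext
    rw [hinner, PySem.Dict.items_counter,
      pvItems_fresh _ _ (PySem.Set.nodup_ofList ((P.filter (fun p => p.1 == c)).map (fun p => p.2)))]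
  · subst hnil
    rfl
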